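-- pv_equiv track=rewrite | github.com/JeffTM/Markov-Bot-Py | Formatter.py | capped_sentence_list
-- ===== SOURCE A (Python) =====
-- def _is_punctuation(c):
--     '''Returns true if c is in ('!', ',', '.', ':', ';', '?')'''
--     return c in ('!', ',', '.', ':', ';', '?')
--
-- def _is_send(c):
--     '''Returns true is c is sentence ending puctuation.
--
--     Specifically, returns true if c is in ('!', '.', ';', '?').
--     '''
--
--     return c in ('!', '.', ';', '?')
--
-- def capped_sentence_list(tokens):
--     '''Formats the tokens into a list of capitalized sentences.
--
--     Sentence ending puctuation is joined to the previous token.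
--     The first letter of the first token after the punctuation is capitalized.
--     tokens -- a list of tokens to be formatted.
--     return -- a list of strings where each string is a sentence
--     '''
--
--     if not tokens: #if tokens is empty
--         return ['']
--
--     result = [[]]
--
--     for token in tokens:
--         if _is_punctuation(token):
--             result[-1].append(token)
--             if _is_send(token):
--                 result.append([])
--         else:
--             if result[-1]: #if the current list is not empty
--                 result[-1].append(' ')
--                 if token == 'i': #if the token is the letter i capitalize it
--                     token = 'I'
--                 result[-1].append(token)
--             else: #if it is empty
--                 result[-1].append(token[0].upper() + token[1:]) #capitalize the word
--
--     if not result[-1]: #if the last list is empty remove it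
--         result.pop()
--
--     for i in range(len(result)):
--         result[i] = ''.join(result[i])
--
--     return result
-- ===== SOURCE B (Python) =====
-- def _is_punctuation(c):
--     '''Returns true if c is in ('!', ',', '.', ':', ';', '?')'''
--     return c in ('!', ',', '.', ':', ';', '?')
--
-- def _is_send(c):
--     '''Returns true if c is sentence ending punctuation.'''
--     return c in ('!', '.', ';', '?')
--
-- def _format_group(group):
--     '''Formats one sentence's tokens into a string.'''
--     buf = ''
--     for t in group:
--         if _is_punctuation(t):
--             buf += t
--         elif buf:
--             buf += ' ' + ('I' if t == 'i' else t)
--         else: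
--             buf = t[:1].upper() + t[1:]
--     return buf
--
-- def capped_sentence_list(tokens):
--     if not tokens:
--         return ['']
--     groups = []
--     current = []
--     for t in tokens:
--         current.append(t)
--         if _is_send(t):
--             groups.append(current)
--             current = []
--     if current:
--         groups.append(current)
--     return [_format_group(g) for g in groups]
-- ===== Notes on version B (the rewrite author's own statement) =====
-- stated objective: alternative
-- what changed: Replaces A's single pass that mutates the last element of a list-of-piece-lists with a two-pass decomposition: first split the tokens into sentence groups after each sentence-ending token, then format each group independently with a string buffer.
-- crash fix: On inputs containing an empty-string token as the first token or immediately after sentence-ending punctuation, A raises IndexError (token[0] on ''), while B returns the sentence list in which that empty token contributes nothing ('' capitalizes to ''). — e.g. on capped_sentence_list([""]): A raises IndexError, B returns [""]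
import Mathlib
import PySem

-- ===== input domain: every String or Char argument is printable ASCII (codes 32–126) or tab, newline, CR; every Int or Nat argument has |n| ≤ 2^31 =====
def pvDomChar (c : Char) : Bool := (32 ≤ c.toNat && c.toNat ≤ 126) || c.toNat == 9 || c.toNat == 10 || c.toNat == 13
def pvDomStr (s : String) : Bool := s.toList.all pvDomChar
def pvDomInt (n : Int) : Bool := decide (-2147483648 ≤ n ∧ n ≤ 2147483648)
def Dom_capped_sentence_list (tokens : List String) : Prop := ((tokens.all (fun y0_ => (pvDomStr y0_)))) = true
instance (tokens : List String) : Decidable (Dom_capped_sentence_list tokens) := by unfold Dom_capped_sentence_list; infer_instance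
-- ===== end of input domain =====

-- B replaces A's single pass mutating the last piece-list with a two-pass decomposition
-- (group the tokens into sentences, then format each group independently); return value only.

-- ===== PORT A =====
-- _is_punctuation
def pvIsPunct (c : String) : Bool := c == "!" || c == "," || c == "." || c == ":" || c == ";" || c == "?"
-- _is_send
def pvIsSend (c : String) : Bool := c == "!" || c == "." || c == ";" || c == "?"
-- token[0].upper() + token[1:] ; Python raises IndexError on token = "" (excluded by Pre_)
def pvCapA (t : String) : String :=
  match t.toList with
  | [] => ""
  | c :: cs => String.ofList (PySem.Chars.upperChar c :: cs)
-- one iteration of A's loop; 'result' is stored REVERSED (head = Python's result[-1]),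
-- a group's pieces are stored in order, so result[-1].append is surgery on the head.
def pvStepA (r : List (List String)) (token : String) : List (List String) :=
  match r with
  | [] => []  -- unreachable: result starts as [[]] and never becomes empty
  | g :: rest =>
    if pvIsPunct token then
      let r' := (g ++ [token]) :: rest
      if pvIsSend token then [] :: r' else r'
    else if g ≠ [] then
      (g ++ [" ", if token == "i" then "I" else token]) :: rest
    else
      (g ++ [pvCapA token]) :: rest

def capped_sentence_list (tokens : List String) : List String :=
  if tokens = [] then [""]
  else
    let r := tokens.foldl pvStepA [[]]
    let r := if r.head? = some [] then r.tail else r   -- if not result[-1]: result.pop()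
    (r.reverse).map (fun g => g.foldl (· ++ ·) "")   -- ''.join(result[i]) (in original order)

-- ===== PORT B =====
-- t[:1].upper() + t[1:]
def pvCapB (t : String) : String :=
  match t.toList with
  | [] => ""
  | c :: cs => String.ofList (PySem.Chars.upperChar c :: cs)
-- first pass: split tokens into sentence groups; 'groups' stored REVERSED, 'current' in order
def pvStepGroup (st : List (List String) × List String) (t : String) : List (List String) × List String :=
  let cur := st.2 ++ [t]
  if pvIsSend t then (cur :: st.1, []) else (st.1, cur)
-- _format_group's loop body
def pvFmtTok (buf : String) (t : String) : String :=
  if pvIsPunct t then buf ++ t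
  else if buf ≠ "" then buf ++ " " ++ (if t == "i" then "I" else t)
  else pvCapB t
-- _format_group
def pvFmt (g : List String) : String := g.foldl pvFmtTok ""

def capped_sentence_list_alt (tokens : List String) : List String :=
  if tokens = [] then [""]
  else
    let st := tokens.foldl pvStepGroup ([], [])
    let gs := if st.2 ≠ [] then st.2 :: st.1 else st.1
    gs.reverse.map pvFmt

-- ===== PRECONDITION & SPEC =====
-- Pre_ excludes exactly the inputs on which A raises IndexError: an empty-string token that
-- begins a sentence (first token, or right after sentence-ending punctuation) reaches token[0].
-- no empty-string token directly after a sentence-ending token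
def pvChainOk : List String → Bool
  | a :: b :: l => (!(b == "") || !pvIsSend a) && pvChainOk (b :: l)
  | _ => true
def Pre_capped_sentence_list (tokens : List String) : Prop :=
  tokens.head? ≠ some "" ∧ pvChainOk tokens = true
instance (tokens : List String) : Decidable (Pre_capped_sentence_list tokens) := by
  unfold Pre_capped_sentence_list; infer_instance
def pvWitness_capped_sentence_list : List String := ["hello", "world", "!", "i", "am", ",", "here", "."]

-- A raises IndexError on these inputs (an empty token starting a sentence); B returns the
-- sentence list in which the empty token contributes nothing ('' capitalizes to '').
def Raises_capped_sentence_list (tokens : List String) : Prop := ¬ Pre_capped_sentence_list tokens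
instance (tokens : List String) : Decidable (Raises_capped_sentence_list tokens) := by
  unfold Raises_capped_sentence_list; infer_instance
def pvRaiseWitness_capped_sentence_list : List String := [""]
def pvRaiseWitnessOut_capped_sentence_list : List String := [""]

def Spec_capped_sentence_list (tokens : List String) (out : List String) : Prop := out = capped_sentence_list_alt tokens
instance (tokens : List String) (out : List String) : Decidable (Spec_capped_sentence_list tokens out) := by unfold Spec_capped_sentence_list; infer_instance

-- ===== CLAIM (what is proved, stated in full; the proofs are below) =====
def Claim_equal_capped_sentence_list : Prop := ∀ (tokens : List String), Dom_capped_sentence_list tokens → Pre_capped_sentence_list tokens → Spec_capped_sentence_list tokens (capped_sentence_list tokens)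
def Claim_raises_capped_sentence_list : Prop := (∀ (tokens : List String), Dom_capped_sentence_list tokens → Raises_capped_sentence_list tokens → ¬ Pre_capped_sentence_list tokens) ∧ (Dom_capped_sentence_list (pvRaiseWitness_capped_sentence_list) ∧ Raises_capped_sentence_list (pvRaiseWitness_capped_sentence_list) ∧ capped_sentence_list_alt (pvRaiseWitness_capped_sentence_list) = pvRaiseWitnessOut_capped_sentence_list)

-- ===== LEMMAS AND PROOFS =====

-- the within-one-group part of A's step (what happens to result[-1])
def pvPieceStep (p : List String) (t : String) : List String :=
  if pvIsPunct t then p ++ [t]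
  else if p ≠ [] then p ++ [" ", if t == "i" then "I" else t]
  else p ++ [pvCapA t]

def pvPieces (g : List String) : List String := g.foldl pvPieceStep []

theorem pv_send_imp_punct (t : String) (h : pvIsSend t = true) : pvIsPunct t = true := by
  simp only [pvIsSend, pvIsPunct, Bool.or_eq_true, beq_iff_eq] at *
  tauto

theorem pvStepA_char (p : List String) (G : List (List String)) (t : String) :
    pvStepA (p :: G) t =
      if pvIsSend t then [] :: pvPieceStep p t :: G else pvPieceStep p t :: G := by
  unfold pvStepA pvPieceStep
  by_cases hp : pvIsPunct t
  · simp [hp]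
  · have hs : pvIsSend t = false := by
      cases h : pvIsSend t
      · rfl
      · exact absurd (pv_send_imp_punct t h) hp
    simp only [hp, hs, Bool.false_eq_true, if_false]
    by_cases he : p = [] <;> simp [he]

theorem pvPieces_concat (g : List String) (t : String) :
    pvPieces (g ++ [t]) = pvPieceStep (pvPieces g) t := by
  simp [pvPieces, List.foldl_append]

-- Lemma 1: A's state is the image of B's grouping state under pvPieces, unconditionally.
theorem pv_state_rel (ts : List String) :
    ∀ (gs : List (List String)) (cur : List String),
      ts.foldl pvStepA (pvPieces cur :: gs.map pvPieces)
        = pvPieces (ts.foldl pvStepGroup (gs, cur)).2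
            :: ((ts.foldl pvStepGroup (gs, cur)).1.map pvPieces) := by
  induction ts with
  | nil => intro gs cur; simp
  | cons t rest ih =>
    intro gs cur
    simp only [List.foldl_cons]
    rw [pvStepA_char]
    by_cases hs : pvIsSend t
    · have h1 : pvPieceStep (pvPieces cur) t = pvPieces (cur ++ [t]) :=
        (pvPieces_concat _ _).symm
      rw [h1]
      have h2 := ih ((cur ++ [t]) :: gs) []
      simpa [pvStepGroup, hs, pvPieces] using h2
    · have h1 : pvPieceStep (pvPieces cur) t = pvPieces (cur ++ [t]) :=
        (pvPieces_concat _ _).symm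
      rw [h1]
      have h2 := ih gs (cur ++ [t])
      simpa [pvStepGroup, hs] using h2

-- pvPieceStep never returns []
theorem pvPieceStep_ne_nil (p : List String) (t : String) : pvPieceStep p t ≠ [] := by
  unfold pvPieceStep; split_ifs <;> simp

theorem pv_foldl_pieceStep_ne_nil (g : List String) :
    ∀ p, p ≠ [] → g.foldl pvPieceStep p ≠ [] := by
  induction g with
  | nil => intro p hp; simpa using hp
  | cons t g' ih => intro p _; simp only [List.foldl_cons]; exact ih _ (pvPieceStep_ne_nil p t)

-- Lemma 3: pvPieces g = [] iff g = []
theorem pvPieces_eq_nil_iff (g : List String) : pvPieces g = [] ↔ g = [] := by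
  constructor
  · intro h
    cases g with
    | nil => rfl
    | cons t g' =>
      exact absurd h (pv_foldl_pieceStep_ne_nil g' (pvPieceStep [] t) (pvPieceStep_ne_nil [] t))
  · intro h; subst h; rfl

theorem pvChainOk_cons (t : String) (rest : List String) (h : pvChainOk (t :: rest) = true) :
    pvChainOk rest = true ∧ (rest.head? = some "" → pvIsSend t = false) := by
  cases rest with
  | nil => exact ⟨rfl, by simp⟩
  | cons b l =>
    simp only [pvChainOk, Bool.and_eq_true, Bool.or_eq_true, Bool.not_eq_true',
      beq_eq_false_iff_ne] at h
    refine ⟨h.2, ?_⟩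
    intro hb
    rcases h.1 with h1 | h1
    · exact absurd (Option.some.inj hb) h1
    · exact h1

-- group heads stay nonempty strings through B's grouping pass, given Pre_'s chain condition
theorem pv_groups_ok (ts : List String) :
    ∀ (gs : List (List String)) (cur : List String),
      (cur = [] → ts.head? ≠ some "") →
      cur.head? ≠ some "" →
      (∀ g ∈ gs, g.head? ≠ some "") →
      pvChainOk ts = true →
      (∀ g ∈ (ts.foldl pvStepGroup (gs, cur)).1, g.head? ≠ some "") ∧
        (ts.foldl pvStepGroup (gs, cur)).2.head? ≠ some "" := by
  induction ts with
  | nil => intro gs cur _ h2 h3 _; exact ⟨h3, h2⟩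
  | cons t rest ih =>
    intro gs cur h1 h2 h3 hch
    obtain ⟨hch', hhead⟩ := pvChainOk_cons t rest hch
    simp only [List.foldl_cons]
    have hcur : (cur ++ [t]).head? ≠ some "" := by
      cases cur with
      | nil =>
        have ht : t ≠ "" := by
          intro he; exact h1 rfl (by rw [he]; rfl)
        simpa using ht
      | cons c cs => simpa using h2
    by_cases hs : pvIsSend t
    · have hnew1 : ([] : List String) = [] → rest.head? ≠ some "" := by
        intro _ hc
        have := hhead hc
        rw [hs] at this
        cases this
      have hnew3 : ∀ g ∈ (cur ++ [t]) :: gs, g.head? ≠ some "" := by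
        intro g hg
        rcases List.mem_cons.mp hg with hg | hg
        · subst hg; exact hcur
        · exact h3 g hg
      have := ih ((cur ++ [t]) :: gs) [] hnew1 (by simp) hnew3 hch'
      simpa [pvStepGroup, hs] using this
    · have := ih gs (cur ++ [t]) (by intro h; exact absurd h (by simp)) hcur h3 hch'
      simpa [pvStepGroup, hs] using this

-- per-group: joining A's pieces equals B's buffer formatting, for a group whose head is not ''
theorem pv_fmt_invariant (g : List String) :
    ∀ (p : List String), p ≠ [] → p.foldl (· ++ ·) "" ≠ "" →
      g.foldl pvFmtTok (p.foldl (· ++ ·) "") = (g.foldl pvPieceStep p).foldl (· ++ ·) "" := by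
  induction g with
  | nil => intro p _ _; rfl
  | cons t g' ih =>
    intro p hp hj
    simp only [List.foldl_cons]
    have hstep : pvFmtTok (p.foldl (· ++ ·) "") t = (pvPieceStep p t).foldl (· ++ ·) "" := by
      by_cases hpu : pvIsPunct t
      · simp [pvFmtTok, pvPieceStep, hpu, List.foldl_append]
      · simp [pvFmtTok, pvPieceStep, hpu, hp, hj, List.foldl_append]
    have hjoin : (pvPieceStep p t).foldl (· ++ ·) "" ≠ "" := by
      by_cases hpu : pvIsPunct t <;>
        simp [pvPieceStep, hpu, hp, List.foldl_append, String.append_eq_empty_iff, hj]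
    rw [hstep]
    exact ih _ (pvPieceStep_ne_nil p t) hjoin

theorem pv_fmt_group (g : List String) (h : g.head? ≠ some "") :
    pvFmt g = (pvPieces g).foldl (· ++ ·) "" := by
  cases g with
  | nil => rfl
  | cons t g' =>
    have ht : t ≠ "" := by simpa using h
    have h0 : pvFmtTok "" t = (pvPieceStep [] t).foldl (· ++ ·) "" := by
      have hAB : pvCapB t = pvCapA t := rfl
      by_cases hpu : pvIsPunct t <;> simp [pvFmtTok, pvPieceStep, hpu, hAB]
    have hj : (pvPieceStep [] t).foldl (· ++ ·) "" ≠ "" := by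
      by_cases hpu : pvIsPunct t
      · simpa [pvPieceStep, hpu] using ht
      · cases hcl : t.toList with
        | nil => exact absurd (by simpa using congrArg String.ofList hcl) ht
        | cons c cs => simp [pvPieceStep, hpu, pvCapA, hcl]
    unfold pvFmt pvPieces
    simp only [List.foldl_cons]
    rw [h0]
    exact pv_fmt_invariant g' _ (pvPieceStep_ne_nil [] t) hj

-- final assembly: both sides' output lists coincide, group by group
theorem pv_final (L : List (List String)) (hall : ∀ g ∈ L, g.head? ≠ some "") :
    (L.map pvPieces).reverse.map (fun g => g.foldl (· ++ ·) "") = L.reverse.map pvFmt := by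
  rw [List.map_reverse, List.map_reverse, List.map_map]
  congr 1
  exact List.map_congr_left (fun g hg => (pv_fmt_group g (hall g hg)).symm)

-- ===== VERDICT (by name: the statement is the Claim_ definition above) =====
theorem capped_sentence_list_spec : Claim_equal_capped_sentence_list := by
  intro tokens _ hpre
  obtain ⟨hhead, hchain⟩ := hpre
  unfold Spec_capped_sentence_list
  by_cases hnil : tokens = []
  · subst hnil; rfl
  · simp only [capped_sentence_list, capped_sentence_list_alt, if_neg hnil]
    have hrel : tokens.foldl pvStepA [[]]
        = pvPieces (tokens.foldl pvStepGroup ([], [])).2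
            :: ((tokens.foldl pvStepGroup ([], [])).1.map pvPieces) := by
      simpa using pv_state_rel tokens [] []
    have hok := pv_groups_ok tokens [] [] (fun _ => hhead) (by simp) (by simp) hchain
    obtain ⟨hgs, hcur⟩ := hok
    rw [hrel]
    by_cases hc : (tokens.foldl pvStepGroup ([], [])).2 = []
    · have hpp : pvPieces (tokens.foldl pvStepGroup ([], [])).2 = [] := by
        simp [hc, pvPieces]
      rw [hpp]
      simp only [List.head?_cons, List.tail_cons, hc, ne_eq, not_true_eq_false, if_false]
      exact pv_final _ hgs
    · have hpp : pvPieces (tokens.foldl pvStepGroup ([], [])).2 ≠ [] := by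
        simpa [pvPieces_eq_nil_iff] using hc
      cases hq : pvPieces (tokens.foldl pvStepGroup ([], [])).2 with
      | nil => exact absurd hq hpp
      | cons x xs =>
        rw [if_neg (by simp), if_pos hc]
        have hall : ∀ g ∈ (tokens.foldl pvStepGroup ([], [])).2
            :: (tokens.foldl pvStepGroup ([], [])).1, g.head? ≠ some "" := by
          intro g hg
          rcases List.mem_cons.mp hg with hg | hg
          · subst hg; exact hcur
          · exact hgs g hg
        have := pv_final _ hall
        simp only [List.map_cons] at this
        rw [hq] at this
        exact this
@[simp]
theorem capped_sentence_list_raises : Claim_raises_capped_sentence_list := by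
  unfold Claim_raises_capped_sentence_list
  exact ⟨fun _ _ h => h, by decide⟩
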